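-- pv_equiv track=rewrite | github.com/K-Vivek-Kumar/page-ranking | changes.py | diffTable
-- ===== SOURCE A (Python) =====
-- def diffTable(pr: list[str], ipr: list[str]):
--     diff = []
--     for idx, p in enumerate(pr):
--         for jdx, ip in enumerate(ipr):
--             if p == ip:
--                 diff.append(idx - jdx)
--                 break
--     return diff
-- ===== SOURCE B (Python) =====
-- def diffTable(pr: list[str], ipr: list[str]):
--     positions = {}
--     for i, p in enumerate(pr):
--         positions.setdefault(p, []).append(i)
--     pairs = []
--     for j, ip in enumerate(ipr):
--         for i in positions.pop(ip, ()):
--             pairs.append((i, i - j))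
--     pairs.sort(key=lambda t: t[0])
--     return [d for _, d in pairs]
-- ===== Notes on version B (the rewrite author's own statement) =====
-- stated objective: faster
-- what changed: inverts the traversal: B groups pr's positions by value once, then a single pass over ipr scatters (index, index-j) pairs at each value's first occurrence (dict.pop consumes the group so duplicates emit nothing), and a final sort by pr-index restores A's output order
import Mathlib
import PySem

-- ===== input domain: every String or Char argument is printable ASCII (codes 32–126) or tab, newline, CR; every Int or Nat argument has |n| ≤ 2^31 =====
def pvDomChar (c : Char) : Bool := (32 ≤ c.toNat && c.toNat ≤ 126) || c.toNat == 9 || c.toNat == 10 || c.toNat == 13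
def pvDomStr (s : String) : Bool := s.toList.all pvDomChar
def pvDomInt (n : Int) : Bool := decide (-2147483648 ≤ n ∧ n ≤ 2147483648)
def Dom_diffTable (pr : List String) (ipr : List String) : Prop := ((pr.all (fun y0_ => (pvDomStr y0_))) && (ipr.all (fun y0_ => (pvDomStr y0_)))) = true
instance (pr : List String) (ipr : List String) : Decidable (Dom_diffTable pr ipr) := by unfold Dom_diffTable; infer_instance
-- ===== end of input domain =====

-- B inverts the traversal: it groups pr's positions by value, scatters pairs in ONE pass over ipr
-- (pop consumes each value at its first occurrence), then sorts by pr-index (objective: faster).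

-- ===== PORT A =====
-- inner 'for jdx, ip in enumerate(ipr): if p == ip: … break' : first matching jdx gives idx - jdx
def diffInnerA (p : String) (idx : Int) : List (Int × String) → Option Int
  | [] => none
  | (jdx, ip) :: rest => if p == ip then some (idx - jdx) else diffInnerA p idx rest

def diffTable (pr : List String) (ipr : List String) : List Int :=
  (PySem.List.enumerate pr).foldl (fun diff ip =>
    match diffInnerA ip.2 ip.1 (PySem.List.enumerate ipr) with
    | some d => diff ++ [d]
    | none => diff) []

-- ===== PORT B =====
-- 'positions.setdefault(p, []).append(i)' = modify p [] (· ++ [i])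
def buildPositions (pr : List String) : PySem.Dict String (List Int) :=
  (PySem.List.enumerate pr).foldl (fun d ip => d.modify ip.2 [] (· ++ [ip.1])) PySem.Dict.empty

-- one step of 'for j, ip in enumerate(ipr): for i in positions.pop(ip, ()): pairs.append((i, i - j))'
def scatterStep (s : PySem.Dict String (List Int) × List (Int × Int)) (jp : Int × String) :
    PySem.Dict String (List Int) × List (Int × Int) :=
  ((s.1).erase jp.2, ((s.1).getD jp.2 []).foldl (fun ps i => ps ++ [(i, i - jp.1)]) s.2)

def diffTable_alt (pr : List String) (ipr : List String) : List Int :=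
  let pairs := ((PySem.List.enumerate ipr).foldl scatterStep (buildPositions pr, [])).2
  (PySem.List.sorted pairs (fun t => t.1) false).map (·.2)

-- ===== PRECONDITION & SPEC =====
def Spec_diffTable (pr : List String) (ipr : List String) (out : List Int) : Prop := out = diffTable_alt pr ipr
instance (pr : List String) (ipr : List String) (out : List Int) : Decidable (Spec_diffTable pr ipr out) := by unfold Spec_diffTable; infer_instance

-- ===== CLAIM (what is proved, stated in full; the proofs are below) =====
def Claim_equal_diffTable : Prop := ∀ (pr : List String) (ipr : List String), Dom_diffTable pr ipr → Spec_diffTable pr ipr (diffTable pr ipr)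

-- ===== LEMMAS AND PROOFS =====

-- first occurrence index of p in an enumerated list
def firstIdx (p : String) : List (Int × String) → Option Int
  | [] => none
  | (j, ip) :: rest => if ip == p then some j else firstIdx p rest

-- the common reference list: (pr-index, difference) pairs in pr order
def refL (pr : List String) (ipr : List String) : List (Int × Int) :=
  (PySem.List.enumerate pr).filterMap
    (fun ip => (firstIdx ip.2 (PySem.List.enumerate ipr)).map (fun j => (ip.1, ip.1 - j)))

-- the scatter loop, peeled as a recursion over the enumerated ipr
def scatterOut : PySem.Dict String (List Int) → List (Int × String) → List (Int × Int)
  | _, [] => []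
  | P, (j, ip) :: v => (P.getD ip []).map (fun i => (i, i - j)) ++ scatterOut (P.erase ip) v

-- positions of value p in pr
def posOf (pr : List String) (p : String) : List Int :=
  ((PySem.List.enumerate pr).filter (fun ip => ip.2 == p)).map (·.1)

theorem diffInnerA_eq_firstIdx (p : String) (idx : Int) (l : List (Int × String)) :
    diffInnerA p idx l = (firstIdx p l).map (fun j => idx - j) := by
  induction l with
  | nil => rfl
  | cons hd tl ih =>
    obtain ⟨j, ip⟩ := hd
    simp only [diffInnerA, firstIdx]
    by_cases h : p = ip
    · subst h; simp
    · have h1 : (p == ip) = false := by simp [h]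
      have h2 : (ip == p) = false := by simp [Ne.symm h]
      simp [h1, h2, ih]

theorem foldl_append_option (l : List (Int × String)) (acc : List Int) (e : List (Int × String)) :
    l.foldl (fun diff ip => match diffInnerA ip.2 ip.1 e with | some d => diff ++ [d] | none => diff) acc
      = acc ++ l.filterMap (fun ip => diffInnerA ip.2 ip.1 e) := by
  induction l generalizing acc with
  | nil => simp
  | cons hd tl ih =>
    simp only [List.foldl, List.filterMap]
    cases h : diffInnerA hd.2 hd.1 e <;> simp [ih]

-- A's result is the second components of refL
theorem diffTable_eq_refL (pr ipr : List String) :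
    diffTable pr ipr = (refL pr ipr).map (·.2) := by
  unfold diffTable refL
  rw [foldl_append_option (PySem.List.enumerate pr) [] (PySem.List.enumerate ipr)]
  rw [List.map_filterMap]
  simp only [List.nil_append]
  apply List.filterMap_congr
  intro ip _
  rw [diffInnerA_eq_firstIdx]
  cases firstIdx ip.2 (PySem.List.enumerate ipr) <;> rfl

theorem getD_erase (d : PySem.Dict String (List Int)) (k k' : String) :
    (d.erase k).getD k' [] = if k' = k then [] else d.getD k' [] := by
  obtain ⟨l⟩ := d
  simp only [PySem.Dict.getD, PySem.Dict.get?, PySem.Dict.erase]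
  by_cases hk : k' = k
  · subst hk
    have hf : List.find? (fun p => p.1 == k') (List.filter (fun p => !p.1 == k') l) = none := by
      rw [List.find?_eq_none]
      intro x hx
      have := (List.mem_filter.1 hx).2
      simp at this ⊢
      exact this
    rw [hf, if_pos rfl]
    rfl
  · rw [if_neg hk]
    have hf : List.find? (fun p => p.1 == k') (List.filter (fun p => !p.1 == k) l)
        = List.find? (fun p => p.1 == k') l := by
      induction l with
      | nil => rfl
      | cons hd tl ih =>
        rw [List.filter_cons]
        by_cases h : hd.1 = k
        · have hb : (!hd.1 == k) = false := by simp [h]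
          have h2 : (hd.1 == k') = false := by
            rw [h]
            exact beq_eq_false_iff_ne.2 (fun e => hk e.symm)
          rw [hb]
          simp only [Bool.false_eq_true, if_false, List.find?_cons, h2]
          exact ih
        · have hb : (!hd.1 == k) = true := by simp [h]
          rw [hb, if_pos rfl]
          simp only [List.find?_cons]
          cases hd.1 == k' <;> simp [ih]
    rw [hf]

theorem getD_buildPositions (pr : List String) (p : String) :
    (buildPositions pr).getD p [] = posOf pr p := by
  unfold buildPositions posOf
  have h : (PySem.List.enumerate pr).foldl (fun d ip => d.modify ip.2 [] (· ++ [ip.1])) PySem.Dict.empty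
      = ((PySem.List.enumerate pr).map (fun ip => (ip.2, ip.1))).foldl
          (fun d q => d.modify q.1 [] (fun x => x ++ [q.2])) PySem.Dict.empty := by
    rw [List.foldl_map]
  rw [h, PySem.Dict.getD_foldl_modify_append]
  rw [List.filter_map, List.map_map]
  simp [Function.comp_def]

theorem foldl_scatter (e : List (Int × String)) (P : PySem.Dict String (List Int))
    (acc : List (Int × Int)) :
    (e.foldl scatterStep (P, acc)).2 = acc ++ scatterOut P e := by
  induction e generalizing P acc with
  | nil => simp [scatterOut]
  | cons hd v ih =>
    obtain ⟨j, ip⟩ := hd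
    simp only [List.foldl_cons, scatterOut]
    have hstep : scatterStep (P, acc) (j, ip)
        = (P.erase ip, acc ++ (P.getD ip []).map (fun i => (i, i - j))) := by
      unfold scatterStep
      rw [PySem.List.foldl_append_singleton_eq_map (fun i => (i, i - j))]
    rw [hstep, ih, List.append_assoc]

theorem mem_scatterOut (e : List (Int × String)) (P : PySem.Dict String (List Int)) (i d' : Int) :
    (i, d') ∈ scatterOut P e ↔ ∃ p j, firstIdx p e = some j ∧ i ∈ P.getD p [] ∧ d' = i - j := by
  induction e generalizing P with
  | nil => simp [scatterOut, firstIdx]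
  | cons hd v ih =>
    obtain ⟨j0, ip0⟩ := hd
    simp only [scatterOut, List.mem_append, List.mem_map, ih]
    constructor
    · rintro (⟨i1, hi1, heq⟩ | ⟨p, j, h1, h2, h3⟩)
      · cases heq
        exact ⟨ip0, j0, by simp [firstIdx], hi1, rfl⟩
      · have hne : p ≠ ip0 := by
          intro h; subst h
          rw [getD_erase, if_pos rfl] at h2; simp at h2
        rw [getD_erase, if_neg hne] at h2
        refine ⟨p, j, ?_, h2, h3⟩
        have hb : (ip0 == p) = false := by simp [Ne.symm hne]
        simp [firstIdx, hb, h1]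
    · rintro ⟨p, j, h1, h2, h3⟩
      by_cases hp : p = ip0
      · subst hp
        simp only [firstIdx, beq_self_eq_true, if_pos] at h1
        obtain rfl : j0 = j := by simpa using h1
        exact Or.inl ⟨i, h2, by rw [h3]⟩
      · have hb : (ip0 == p) = false := by simp [Ne.symm hp]
        refine Or.inr ⟨p, j, ?_, ?_, h3⟩
        · simpa [firstIdx, hb] using h1
        · rw [getD_erase, if_neg hp]; exact h2

theorem scatterOut_pairwise (e : List (Int × String)) :
    ∀ P : PySem.Dict String (List Int),
      (∀ p, (P.getD p []).Nodup) →
      (∀ p q i, i ∈ P.getD p [] → i ∈ P.getD q [] → p = q) →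
      (scatterOut P e).Pairwise (fun a b => a.1 ≠ b.1) := by
  induction e with
  | nil => intro P _ _; simp [scatterOut]
  | cons hd v ih =>
    intro P h1 h2
    obtain ⟨j0, ip0⟩ := hd
    simp only [scatterOut]
    rw [List.pairwise_append]
    refine ⟨?_, ?_, ?_⟩
    · rw [List.pairwise_map]
      exact (h1 ip0).imp (fun h => by simpa using h)
    · apply ih
      · intro p
        rw [getD_erase]
        split
        · simp
        · exact h1 p
      · intro p q i hp hq
        rw [getD_erase] at hp hq
        split at hp
        · simp at hp
        · split at hq
          · simp at hq
          · exact h2 p q i hp hq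
    · intro a ha b hb
      obtain ⟨i1, hi1, rfl⟩ := List.mem_map.1 ha
      obtain ⟨i2, d2⟩ := b
      rw [mem_scatterOut] at hb
      obtain ⟨p, j, _, hp, _⟩ := hb
      have hne : p ≠ ip0 := by
        intro h; subst h
        rw [getD_erase, if_pos rfl] at hp; simp at hp
      rw [getD_erase, if_neg hne] at hp
      intro hfst
      simp only at hfst
      exact hne (h2 p ip0 i2 hp (hfst ▸ hi1))

theorem mem_posOf (pr : List String) (p : String) (i : Int) :
    i ∈ posOf pr p ↔ (i, p) ∈ PySem.List.enumerate pr := by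
  unfold posOf
  simp only [List.mem_map, List.mem_filter, beq_iff_eq]
  constructor
  · rintro ⟨⟨i1, p1⟩, ⟨hm, rfl⟩, rfl⟩
    exact hm
  · intro h
    exact ⟨(i, p), ⟨h, rfl⟩, rfl⟩

theorem posOf_nodup (pr : List String) (p : String) : (posOf pr p).Nodup := by
  unfold posOf
  exact List.Pairwise.map _ (fun a b h => ne_of_lt h)
    ((PySem.List.pairwise_lt_enumerate pr 0).filter _)

theorem enum_fst_inj (pr : List String) (i : Int) (p q : String)
    (hp : (i, p) ∈ PySem.List.enumerate pr) (hq : (i, q) ∈ PySem.List.enumerate pr) : p = q := by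
  rw [PySem.List.mem_enumerate_iff] at hp hq
  obtain ⟨k, hk, hpk⟩ := hp
  obtain ⟨k2, hk2, hqk⟩ := hq
  obtain ⟨h1, rfl⟩ := Prod.mk.injEq .. ▸ hpk
  obtain ⟨h2, rfl⟩ := Prod.mk.injEq .. ▸ hqk
  have : k = k2 := by omega
  subst this; rfl

theorem refL_pairwise (pr ipr : List String) :
    (refL pr ipr).Pairwise (fun a b => a.1 < b.1) := by
  unfold refL
  rw [List.pairwise_filterMap]
  apply (PySem.List.pairwise_lt_enumerate pr 0).imp
  intro a b hab x hx y hy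
  cases ha : firstIdx a.2 (PySem.List.enumerate ipr) with
  | none => rw [ha] at hx; simp at hx
  | some j =>
    rw [ha] at hx
    simp only [Option.map_some, Option.some_inj] at hx
    cases hb2 : firstIdx b.2 (PySem.List.enumerate ipr) with
    | none => rw [hb2] at hy; simp at hy
    | some j2 =>
      rw [hb2] at hy
      simp only [Option.map_some, Option.some_inj] at hy
      subst hx; subst hy
      simpa using hab

theorem mem_refL (pr ipr : List String) (i d' : Int) :
    (i, d') ∈ refL pr ipr ↔
      ∃ p j, firstIdx p (PySem.List.enumerate ipr) = some j ∧
        (i, p) ∈ PySem.List.enumerate pr ∧ d' = i - j := by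
  unfold refL
  simp only [List.mem_filterMap]
  constructor
  · rintro ⟨⟨i1, p1⟩, hm, hf⟩
    cases hfi : firstIdx p1 (PySem.List.enumerate ipr) <;> rw [hfi] at hf <;> simp at hf
    obtain ⟨rfl, h2⟩ := hf
    exact ⟨p1, _, hfi, hm, h2.symm⟩
  · rintro ⟨p, j, h1, h2, rfl⟩
    exact ⟨(i, p), h2, by simp [h1]⟩

theorem alt_eq_refL (pr ipr : List String) :
    diffTable_alt pr ipr = (refL pr ipr).map (·.2) := by
  show (PySem.List.sorted (((PySem.List.enumerate ipr).foldl scatterStep (buildPositions pr, [])).2)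
      (fun t => t.1)).map (·.2) = (refL pr ipr).map (·.2)
  rw [foldl_scatter, List.nil_append]
  have hn1 : (refL pr ipr).Nodup :=
    (refL_pairwise pr ipr).imp (fun h heq => absurd (congrArg Prod.fst heq) (ne_of_lt h))
  have hn2 : (scatterOut (buildPositions pr) (PySem.List.enumerate ipr)).Nodup := by
    refine List.Pairwise.imp (fun h heq => h (congrArg Prod.fst heq))
      (scatterOut_pairwise _ (buildPositions pr) ?_ ?_)
    · intro p; rw [getD_buildPositions]; exact posOf_nodup pr p
    · intro p q i hp hq
      rw [getD_buildPositions, mem_posOf] at hp hq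
      exact enum_fst_inj pr i p q hp hq
  have hmem : ∀ a, a ∈ refL pr ipr ↔ a ∈ scatterOut (buildPositions pr) (PySem.List.enumerate ipr) := by
    rintro ⟨i, d'⟩
    rw [mem_refL, mem_scatterOut]
    constructor <;> rintro ⟨p, j, h1, h2, h3⟩
    · exact ⟨p, j, h1, by rw [getD_buildPositions, mem_posOf]; exact h2, h3⟩
    · rw [getD_buildPositions, mem_posOf] at h2
      exact ⟨p, j, h1, h2, h3⟩
  have hperm : (refL pr ipr).Perm (scatterOut (buildPositions pr) (PySem.List.enumerate ipr)) :=
    (List.perm_ext_iff_of_nodup hn1 hn2).2 hmem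
  rw [PySem.List.sorted_eq_of_perm_of_pairwise_lt _ _ _ hperm (refL_pairwise pr ipr)]

-- ===== VERDICT (by name: the statement is the Claim_ definition above) =====
theorem diffTable_spec : Claim_equal_diffTable := by
  intro pr ipr _
  show diffTable pr ipr = diffTable_alt pr ipr
  rw [diffTable_eq_refL, alt_eq_refL]
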